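-- pv_equiv track=rewrite | github.com/JConquers/TDA-Mapper | main/get_OpenCover.py | get_cov_z_extract_datapts
-- ===== SOURCE A (Python) =====
-- def get_cov_z_extract_datapts(dataPts, values, paramCov):
--     dataPtsCov = []
--     for intvl in paramCov:
--         minVal=intvl[0]
--         maxVal=intvl[1]
--         temp = []
--         for i in range(0, len(dataPts)):
--             if (values[i]>=minVal and values[i]<=maxVal):
--                 temp.append(dataPts[i])
--         dataPtsCov.append(temp)
--     return dataPtsCov
-- ===== SOURCE B (Python) =====
-- def _bisect_left(a, x):
--     lo, hi = 0, len(a)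
--     while lo < hi:
--         mid = (lo + hi) // 2
--         if a[mid] < x:
--             lo = mid + 1
--         else:
--             hi = mid
--     return lo
--
--
-- def _bisect_right(a, x):
--     lo, hi = 0, len(a)
--     while lo < hi:
--         mid = (lo + hi) // 2
--         if x < a[mid]:
--             hi = mid
--         else:
--             lo = mid + 1
--     return lo
--
--
-- def get_cov_z_extract_datapts(dataPts, values, paramCov):
--     n = len(dataPts)
--     order = sorted(range(n), key=lambda i: values[i])
--     sv = [values[i] for i in order]
--     out = []
--     for mn, mx in paramCov:
--         lo = _bisect_left(sv, mn)
--         hi = _bisect_right(sv, mx)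
--         out.append([dataPts[i] for i in sorted(order[lo:hi])])
--     return out
-- ===== Notes on version B (the rewrite author's own statement) =====
-- stated objective: faster
-- what changed: B sorts the point indices by value once, then answers each interval with two hand-written binary searches on the sorted values and re-sorts the hit indices, instead of A's full scan of all points for every interval.
-- outside the precondition, e.g. on get_cov_z_extract_datapts([7], [], []): A returns [], B raises IndexError
import Mathlib
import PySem

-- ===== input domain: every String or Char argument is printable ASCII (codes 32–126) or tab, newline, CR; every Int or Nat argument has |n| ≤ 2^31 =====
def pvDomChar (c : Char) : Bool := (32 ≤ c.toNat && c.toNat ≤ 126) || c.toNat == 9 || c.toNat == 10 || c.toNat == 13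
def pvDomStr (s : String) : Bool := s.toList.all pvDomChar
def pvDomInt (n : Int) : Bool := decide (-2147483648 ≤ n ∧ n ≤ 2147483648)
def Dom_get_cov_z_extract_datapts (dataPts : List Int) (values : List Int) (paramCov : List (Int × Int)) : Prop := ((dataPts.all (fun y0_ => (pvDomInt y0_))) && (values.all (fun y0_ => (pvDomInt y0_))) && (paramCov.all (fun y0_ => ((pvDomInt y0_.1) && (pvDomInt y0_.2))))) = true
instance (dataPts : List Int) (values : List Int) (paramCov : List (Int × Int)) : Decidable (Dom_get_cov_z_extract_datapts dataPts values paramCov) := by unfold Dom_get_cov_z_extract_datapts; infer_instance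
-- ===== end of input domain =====

-- B sorts the indices by value once and answers each interval with two binary searches,
-- instead of A's full scan of all points per interval (measurably faster on large inputs).

-- ===== PORT A =====
def get_cov_z_extract_datapts (dataPts : List Int) (values : List Int) (paramCov : List (Int × Int)) : List (List Int) :=
  paramCov.foldl (fun dataPtsCov intvl =>
    let minVal := intvl.1
    let maxVal := intvl.2
    let temp := (PySem.List.pyRange 0 (dataPts.length : Int) 1).foldl (fun temp i =>
      if PySem.List.pyGetD values i 0 ≥ minVal ∧ PySem.List.pyGetD values i 0 ≤ maxVal then
        temp ++ [PySem.List.pyGetD dataPts i 0]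
      else temp) []
    dataPtsCov ++ [temp]) []

-- ===== PORT B =====
-- hand-written binary searches of Source B, transcribed loop for loop (Nat arithmetic is
-- exact here: lo, hi, mid are nonnegative and (lo+hi)//2 is Nat division)
def pvBisectLeftGo (a : List Int) (x : Int) : Nat → Nat → Nat → Nat
  | 0, lo, _hi => lo
  | fuel + 1, lo, hi =>
    if lo < hi then
      let mid := (lo + hi) / 2
      if a.getD mid 0 < x then pvBisectLeftGo a x fuel (mid + 1) hi
      else pvBisectLeftGo a x fuel lo mid
    else lo

def pvBisectRightGo (a : List Int) (x : Int) : Nat → Nat → Nat → Nat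
  | 0, lo, _hi => lo
  | fuel + 1, lo, hi =>
    if lo < hi then
      let mid := (lo + hi) / 2
      if x < a.getD mid 0 then pvBisectRightGo a x fuel lo mid
      else pvBisectRightGo a x fuel (mid + 1) hi
    else lo

-- the fuel (= len(a) initially) only bounds the while loop, which always terminates
-- within it since hi - lo shrinks at every iteration
def pvBisectLeft (a : List Int) (x : Int) : Nat := pvBisectLeftGo a x a.length 0 a.length
def pvBisectRight (a : List Int) (x : Int) : Nat := pvBisectRightGo a x a.length 0 a.length

def get_cov_z_extract_datapts_alt (dataPts : List Int) (values : List Int) (paramCov : List (Int × Int)) : List (List Int) :=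
  let n := dataPts.length
  let order := PySem.List.sorted (PySem.List.pyRange 0 (n : Int) 1) (fun i => PySem.List.pyGetD values i 0)
  let sv := order.map (fun i => PySem.List.pyGetD values i 0)
  paramCov.foldl (fun out intvl =>
    let lo := pvBisectLeft sv intvl.1
    let hi := pvBisectRight sv intvl.2
    out ++ [(PySem.List.sorted (PySem.List.slice order (some (lo : Int)) (some (hi : Int))) (fun i => i)).map
              (fun i => PySem.List.pyGetD dataPts i 0)]) []

-- ===== PRECONDITION & SPEC =====
-- A raises IndexError on values[i] when values is shorter than dataPts and paramCov is
-- nonempty; B computes values[i] for every i < len(dataPts) up front, so it raises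
-- whenever values is shorter than dataPts, even for empty paramCov (where A returns []):
-- Pre_ excludes those inputs (cited in claim.json).
def Pre_get_cov_z_extract_datapts (dataPts : List Int) (values : List Int) (paramCov : List (Int × Int)) : Prop :=
  dataPts.length ≤ values.length
instance (dataPts : List Int) (values : List Int) (paramCov : List (Int × Int)) : Decidable (Pre_get_cov_z_extract_datapts dataPts values paramCov) := by unfold Pre_get_cov_z_extract_datapts; infer_instance
def pvWitness_get_cov_z_extract_datapts : List Int × List Int × (List (Int × Int)) := ([10, 20, 30], [1, 5, 2], [(1, 2), (3, 9)])

def Spec_get_cov_z_extract_datapts (dataPts : List Int) (values : List Int) (paramCov : List (Int × Int)) (out : List (List Int)) : Prop := out = get_cov_z_extract_datapts_alt dataPts values paramCov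
instance (dataPts : List Int) (values : List Int) (paramCov : List (Int × Int)) (out : List (List Int)) : Decidable (Spec_get_cov_z_extract_datapts dataPts values paramCov out) := by unfold Spec_get_cov_z_extract_datapts; infer_instance

-- ===== CLAIM (what is proved, stated in full; the proofs are below) =====
def Claim_equal_get_cov_z_extract_datapts : Prop := ∀ (dataPts : List Int) (values : List Int) (paramCov : List (Int × Int)), Dom_get_cov_z_extract_datapts dataPts values paramCov → Pre_get_cov_z_extract_datapts dataPts values paramCov → Spec_get_cov_z_extract_datapts dataPts values paramCov (get_cov_z_extract_datapts dataPts values paramCov)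

-- ===== LEMMAS AND PROOFS =====

-- correctness of the hand-written binary searches on a sorted list
theorem pvBisectLeftGo_spec (a : List Int) (x : Int) (hs : a.Pairwise (· ≤ ·)) :
    ∀ (d lo hi : Nat), hi - lo ≤ d → lo ≤ hi → hi ≤ a.length →
    (∀ j (hj : j < a.length), j < lo → a[j] < x) →
    (∀ j (hj : j < a.length), hi ≤ j → x ≤ a[j]) →
    pvBisectLeftGo a x d lo hi ≤ a.length ∧
      (∀ j (hj : j < a.length), j < pvBisectLeftGo a x d lo hi → a[j] < x) ∧
      (∀ j (hj : j < a.length), pvBisectLeftGo a x d lo hi ≤ j → x ≤ a[j]) := by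
  intro d
  induction d with
  | zero =>
    intro lo hi hd hlohi hhi hb ha
    rw [show pvBisectLeftGo a x 0 lo hi = lo from rfl]
    exact ⟨by omega, fun j hj hjlo => hb j hj hjlo, fun j hj hjlo => ha j hj (by omega)⟩
  | succ d ih =>
    intro lo hi hd hlohi hhi hb ha
    by_cases hlt : lo < hi
    · simp only [pvBisectLeftGo, if_pos hlt]
      have hmlt : (lo + hi) / 2 < hi := by omega
      have hmge : lo ≤ (lo + hi) / 2 := by omega
      have hmlen : (lo + hi) / 2 < a.length := by omega
      have hget : a.getD ((lo + hi) / 2) 0 = a[(lo + hi) / 2] := List.getD_eq_getElem a 0 hmlen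
      by_cases hc : a.getD ((lo + hi) / 2) 0 < x
      · rw [if_pos hc]
        rw [hget] at hc
        refine ih ((lo + hi) / 2 + 1) hi (by omega) (by omega) hhi (fun j hj hjlt => ?_) ha
        rcases Nat.lt_or_ge j lo with hcase | hcase
        · exact hb j hj hcase
        · rcases Nat.lt_or_ge j ((lo + hi) / 2) with hjm | hjm
          · exact lt_of_le_of_lt (List.pairwise_iff_getElem.mp hs j ((lo + hi) / 2) hj hmlen hjm) hc
          · have : j = (lo + hi) / 2 := by omega
            subst this; exact hc
      · rw [if_neg hc]
        rw [hget] at hc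
        refine ih lo ((lo + hi) / 2) (by omega) (by omega) (by omega) hb (fun j hj hjge => ?_)
        rcases Nat.lt_or_ge j hi with hjhi | hjhi
        · rcases Nat.lt_or_ge ((lo + hi) / 2) j with hjm | hjm
          · exact le_trans (not_lt.mp hc) (List.pairwise_iff_getElem.mp hs ((lo + hi) / 2) j hmlen hj hjm)
          · have : j = (lo + hi) / 2 := by omega
            subst this; exact not_lt.mp hc
        · exact ha j hj hjhi
    · simp only [pvBisectLeftGo, if_neg hlt]
      exact ⟨by omega, fun j hj hjlo => hb j hj hjlo, fun j hj hjlo => ha j hj (by omega)⟩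

theorem pvBisectRightGo_spec (a : List Int) (x : Int) (hs : a.Pairwise (· ≤ ·)) :
    ∀ (d lo hi : Nat), hi - lo ≤ d → lo ≤ hi → hi ≤ a.length →
    (∀ j (hj : j < a.length), j < lo → a[j] ≤ x) →
    (∀ j (hj : j < a.length), hi ≤ j → x < a[j]) →
    pvBisectRightGo a x d lo hi ≤ a.length ∧
      (∀ j (hj : j < a.length), j < pvBisectRightGo a x d lo hi → a[j] ≤ x) ∧
      (∀ j (hj : j < a.length), pvBisectRightGo a x d lo hi ≤ j → x < a[j]) := by
  intro d
  induction d with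
  | zero =>
    intro lo hi hd hlohi hhi hb ha
    rw [show pvBisectRightGo a x 0 lo hi = lo from rfl]
    exact ⟨by omega, fun j hj hjlo => hb j hj hjlo, fun j hj hjlo => ha j hj (by omega)⟩
  | succ d ih =>
    intro lo hi hd hlohi hhi hb ha
    by_cases hlt : lo < hi
    · simp only [pvBisectRightGo, if_pos hlt]
      have hmlt : (lo + hi) / 2 < hi := by omega
      have hmge : lo ≤ (lo + hi) / 2 := by omega
      have hmlen : (lo + hi) / 2 < a.length := by omega
      have hget : a.getD ((lo + hi) / 2) 0 = a[(lo + hi) / 2] := List.getD_eq_getElem a 0 hmlen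
      by_cases hc : x < a.getD ((lo + hi) / 2) 0
      · rw [if_pos hc]
        rw [hget] at hc
        refine ih lo ((lo + hi) / 2) (by omega) (by omega) (by omega) hb (fun j hj hjge => ?_)
        rcases Nat.lt_or_ge j hi with hjhi | hjhi
        · rcases Nat.lt_or_ge ((lo + hi) / 2) j with hjm | hjm
          · exact lt_of_lt_of_le hc (List.pairwise_iff_getElem.mp hs ((lo + hi) / 2) j hmlen hj hjm)
          · have : j = (lo + hi) / 2 := by omega
            subst this; exact hc
        · exact ha j hj hjhi
      · rw [if_neg hc]
        rw [hget] at hc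
        refine ih ((lo + hi) / 2 + 1) hi (by omega) (by omega) hhi (fun j hj hjlt => ?_) ha
        rcases Nat.lt_or_ge j lo with hcase | hcase
        · exact hb j hj hcase
        · rcases Nat.lt_or_ge j ((lo + hi) / 2) with hjm | hjm
          · exact le_trans (List.pairwise_iff_getElem.mp hs j ((lo + hi) / 2) hj hmlen hjm) (not_lt.mp hc)
          · have : j = (lo + hi) / 2 := by omega
            subst this; exact not_lt.mp hc
    · simp only [pvBisectRightGo, if_neg hlt]
      exact ⟨by omega, fun j hj hjlo => hb j hj hjlo, fun j hj hjlo => ha j hj (by omega)⟩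

theorem pvBisectLeft_spec (a : List Int) (x : Int) (hs : a.Pairwise (· ≤ ·)) :
    pvBisectLeft a x ≤ a.length ∧
      (∀ j (hj : j < a.length), j < pvBisectLeft a x → a[j] < x) ∧
      (∀ j (hj : j < a.length), pvBisectLeft a x ≤ j → x ≤ a[j]) :=
  pvBisectLeftGo_spec a x hs a.length 0 a.length (by omega) (by omega) le_rfl
    (fun j hj h => absurd h (by omega)) (fun j hj h => absurd hj (by omega))

theorem pvBisectRight_spec (a : List Int) (x : Int) (hs : a.Pairwise (· ≤ ·)) :
    pvBisectRight a x ≤ a.length ∧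
      (∀ j (hj : j < a.length), j < pvBisectRight a x → a[j] ≤ x) ∧
      (∀ j (hj : j < a.length), pvBisectRight a x ≤ j → x < a[j]) :=
  pvBisectRightGo_spec a x hs a.length 0 a.length (by omega) (by omega) le_rfl
    (fun j hj h => absurd h (by omega)) (fun j hj h => absurd hj (by omega))

-- a list whose keyed elements are < mn before lo, ≥ mn from lo on, ≤ mx before hi and
-- > mx from hi on filters to exactly its [lo:hi] segment
theorem pvFilter_eq_slice (v : Int → Int) (mn mx : Int) :
    ∀ (L : List Int) (lo hi : Nat), lo ≤ L.length → hi ≤ L.length →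
    (∀ p (hp : p < L.length), p < lo → v L[p] < mn) →
    (∀ p (hp : p < L.length), lo ≤ p → mn ≤ v L[p]) →
    (∀ p (hp : p < L.length), p < hi → v L[p] ≤ mx) →
    (∀ p (hp : p < L.length), hi ≤ p → mx < v L[p]) →
    L.filter (fun i => decide (mn ≤ v i ∧ v i ≤ mx)) = (L.drop lo).take (hi - lo) := by
  intro L
  induction L with
  | nil => intro lo hi _ _ _ _ _ _; simp
  | cons h t ihL =>
    intro lo hi hlo hhi h1 h2 h3 h4
    match hi, lo with
    | 0, lo =>
      have hnil : List.filter (fun i => decide (mn ≤ v i ∧ v i ≤ mx)) (h :: t) = [] := by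
        rw [List.filter_eq_nil_iff]
        intro y hy
        obtain ⟨p, hp, rfl⟩ := List.mem_iff_getElem.mp hy
        have := h4 p hp (Nat.zero_le p)
        simp only [decide_eq_true_eq]
        omega
      rw [hnil]
      simp
    | (k+1), 0 =>
      have hmn : mn ≤ v h := by simpa using h2 0 (by simp) (by omega)
      have hmx : v h ≤ mx := by simpa using h3 0 (by simp) (by omega)
      rw [List.filter_cons_of_pos (by simp only [decide_eq_true_eq]; exact ⟨hmn, hmx⟩)]
      simp only [List.drop_zero, Nat.sub_zero, List.take_succ_cons]
      congr 1
      have ht : List.filter (fun i => decide (mn ≤ v i ∧ v i ≤ mx)) t = (t.drop 0).take (k - 0) := by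
        refine ihL 0 k (by omega) (by simpa using Nat.lt_succ_iff.mp (by simpa using hhi))
          (fun p hp hplt => by omega)
          (fun p hp _ => by simpa using h2 (p+1) (by simpa using Nat.succ_lt_succ hp) (by omega))
          (fun p hp hplt => by simpa using h3 (p+1) (by simpa using Nat.succ_lt_succ hp) (by omega))
          (fun p hp hpge => by simpa using h4 (p+1) (by simpa using Nat.succ_lt_succ hp) (by omega))
      simpa using ht
    | (k+1), (l+1) =>
      have hno : v h < mn := by simpa using h1 0 (by simp) (by omega)
      rw [List.filter_cons_of_neg (by simp only [decide_eq_true_eq, not_and]; intro hmn _; omega)]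
      rw [List.drop_succ_cons, show (k+1) - (l+1) = k - l by omega]
      refine ihL l k (by simpa using Nat.lt_succ_iff.mp (by simpa using hlo))
        (by simpa using Nat.lt_succ_iff.mp (by simpa using hhi))
        (fun p hp hplt => by simpa using h1 (p+1) (by simpa using Nat.succ_lt_succ hp) (by omega))
        (fun p hp hpge => by simpa using h2 (p+1) (by simpa using Nat.succ_lt_succ hp) (by omega))
        (fun p hp hplt => by simpa using h3 (p+1) (by simpa using Nat.succ_lt_succ hp) (by omega))
        (fun p hp hpge => by simpa using h4 (p+1) (by simpa using Nat.succ_lt_succ hp) (by omega))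

-- B's per-interval answer: sorting the binary-searched segment of the value-sorted index
-- list gives exactly the index-ordered filter A computes
theorem pvSortSliceFilter (R : List Int) (v : Int → Int) (mn mx : Int)
    (hR : R.Pairwise (· < ·)) :
    PySem.List.sorted
      (PySem.List.slice (PySem.List.sorted R v)
        (some ((pvBisectLeft ((PySem.List.sorted R v).map v) mn : Nat) : Int))
        (some ((pvBisectRight ((PySem.List.sorted R v).map v) mx : Nat) : Int)))
      (fun i => i)
    = R.filter (fun i => decide (mn ≤ v i ∧ v i ≤ mx)) := by
  have hsv : ((PySem.List.sorted R v).map v).Pairwise (· ≤ ·) :=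
    PySem.List.sorted_map_key_pairwise R v
  obtain ⟨hlo1, hlo2, hlo3⟩ := pvBisectLeft_spec ((PySem.List.sorted R v).map v) mn hsv
  obtain ⟨hhi1, hhi2, hhi3⟩ := pvBisectRight_spec ((PySem.List.sorted R v).map v) mx hsv
  have hlen : ((PySem.List.sorted R v).map v).length = (PySem.List.sorted R v).length := by
    simp
  have hfe : (PySem.List.sorted R v).filter (fun i => decide (mn ≤ v i ∧ v i ≤ mx)) =
      ((PySem.List.sorted R v).drop (pvBisectLeft ((PySem.List.sorted R v).map v) mn)).take
        (pvBisectRight ((PySem.List.sorted R v).map v) mx -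
          pvBisectLeft ((PySem.List.sorted R v).map v) mn) := by
    refine pvFilter_eq_slice v mn mx (PySem.List.sorted R v) _ _ (by omega) (by omega)
      (fun p hp hplt => ?_) (fun p hp hpge => ?_) (fun p hp hplt => ?_) (fun p hp hpge => ?_)
    · have := hlo2 p (by omega) hplt
      simpa using this
    · have := hlo3 p (by omega) hpge
      simpa using this
    · have := hhi2 p (by omega) hplt
      simpa using this
    · have := hhi3 p (by omega) hpge
      simpa using this
  rw [PySem.List.slice_natCast, ← hfe]
  refine PySem.List.sorted_eq_of_perm_of_pairwise_lt _ _ _ ?_ ?_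
  · exact ((PySem.List.sorted_perm R v false).filter _).symm
  · exact hR.filter _

-- ===== VERDICT (by name: the statement is the Claim_ definition above) =====
theorem get_cov_z_extract_datapts_spec : Claim_equal_get_cov_z_extract_datapts := by
  intro dataPts values paramCov _ _
  unfold Spec_get_cov_z_extract_datapts
  simp only [get_cov_z_extract_datapts, get_cov_z_extract_datapts_alt]
  rw [PySem.List.foldl_append_singleton_eq_map, PySem.List.foldl_append_singleton_eq_map]
  simp only [List.nil_append]
  refine List.map_congr_left (fun intvl _ => ?_)
  rw [PySem.List.foldl_append_ite
        (p := fun i => PySem.List.pyGetD values i 0 ≥ intvl.1 ∧ PySem.List.pyGetD values i 0 ≤ intvl.2)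
        (f := fun i => PySem.List.pyGetD dataPts i 0)]
  rw [pvSortSliceFilter (PySem.List.pyRange 0 (dataPts.length : Int) 1)
        (fun i => PySem.List.pyGetD values i 0) intvl.1 intvl.2
        (PySem.List.pairwise_lt_pyRange_one 0 (dataPts.length : Int))]
  simp [ge_iff_le]
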